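-- pv_equiv track=rewrite | github.com/Yuckly/DS593Project | pii-checker/main.py | is_dob_context
-- ===== SOURCE A (Python) =====
-- def is_dob_context(text, start, end):
--     """Check if a date appears in DOB context"""
--     window_size = 40  # chars around the date
--     left = max(0, start - window_size)
--     right = min(len(text), end + window_size)
--     window = text[left:right].lower()
--
--     dob_keywords = [
--         "dob",
--         "date of birth",
--         "birth date",
--         "birthdate",
--         "birthday",
--         "bday",
--         "born",
--         "year of birth"
--     ]
--
--     return any(k in window for k in dob_keywords)
-- ===== SOURCE B (Python) =====
-- def is_dob_context(text, start, end):
--     """Check if a date appears in DOB context"""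
--     window = text[max(0, start - 40):min(len(text), end + 40)].lower()
--
--     # every DOB keyword contains a 'b'; pair each with the offset of its first 'b'
--     anchored = [
--         ("dob", 2),
--         ("date of birth", 8),
--         ("birth date", 0),
--         ("birthdate", 0),
--         ("birthday", 0),
--         ("bday", 0),
--         ("born", 0),
--         ("year of birth", 8),
--     ]
--
--     # anchor-based matching: only at 'b' characters try keywords, aligned on their 'b'
--     for j, c in enumerate(window):
--         if c == 'b':
--             for k, o in anchored:
--                 if j >= o and window.startswith(k, j - o):
--                     return True
--     return False
-- ===== Notes on version B (the rewrite author's own statement) =====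
-- stated objective: alternative
-- what changed: Replaced A's eight independent `k in window` substring scans with one anchor-based pass: scan the window once and, only at 'b' characters (every keyword contains a 'b'), test each keyword aligned on the offset of its first 'b'.
import Mathlib
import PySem

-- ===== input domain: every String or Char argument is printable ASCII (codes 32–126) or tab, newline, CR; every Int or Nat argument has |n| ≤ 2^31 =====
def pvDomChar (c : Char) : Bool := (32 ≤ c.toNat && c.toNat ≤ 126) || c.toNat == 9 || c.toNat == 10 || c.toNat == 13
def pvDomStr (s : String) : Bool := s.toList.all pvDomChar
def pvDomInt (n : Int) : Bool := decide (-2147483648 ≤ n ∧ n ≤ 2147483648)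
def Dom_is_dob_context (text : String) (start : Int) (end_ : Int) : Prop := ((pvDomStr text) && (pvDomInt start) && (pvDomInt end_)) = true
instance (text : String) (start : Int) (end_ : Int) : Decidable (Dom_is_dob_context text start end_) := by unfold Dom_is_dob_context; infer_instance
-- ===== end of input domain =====

-- B replaces A's eight independent `k in window` substring scans by anchor-based matching:
-- every keyword contains 'b', so B scans the window once and, only at 'b' characters,
-- tests each keyword aligned on its first 'b' (alternative algorithm, same cost).

-- ===== PORT A =====
def dobKeywords : List String :=
  ["dob", "date of birth", "birth date", "birthdate", "birthday", "bday", "born", "year of birth"]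

def is_dob_context (text : String) (start : Int) (end_ : Int) : Bool :=
  let window_size : Int := 40
  let left := max 0 (start - window_size)
  let right := min (PySem.Str.len text) (end_ + window_size)
  let window := PySem.Str.lower (PySem.Str.slice text (some left) (some right))
  dobKeywords.any (fun k => PySem.Str.isIn k window)

-- ===== PORT B =====
-- each keyword paired with the offset of its first 'b'
def dobAnchored : List (String × Nat) :=
  [("dob", 2), ("date of birth", 8), ("birth date", 0), ("birthdate", 0),
   ("birthday", 0), ("bday", 0), ("born", 0), ("year of birth", 8)]

def is_dob_context_alt (text : String) (start : Int) (end_ : Int) : Bool :=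
  let w := (PySem.Str.lower (PySem.Str.slice text
             (some (max 0 (start - 40))) (some (min (PySem.Str.len text) (end_ + 40))))).toList
  (PySem.List.enumerate w).any (fun jc =>
    jc.2 == 'b' && dobAnchored.any (fun ko =>
      (ko.2 : Int) ≤ jc.1 && PySem.Chars.startswith (w.drop (jc.1 - (ko.2 : Int)).toNat) ko.1.toList))

-- ===== PRECONDITION & SPEC =====
def Spec_is_dob_context (text : String) (start : Int) (end_ : Int) (out : Bool) : Prop := out = is_dob_context_alt text start end_
instance (text : String) (start : Int) (end_ : Int) (out : Bool) : Decidable (Spec_is_dob_context text start end_ out) := by unfold Spec_is_dob_context; infer_instance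

-- ===== CLAIM =====
def Claim_equal_is_dob_context : Prop := ∀ (text : String) (start : Int) (end_ : Int), Dom_is_dob_context text start end_ → Spec_is_dob_context text start end_ (is_dob_context text start end_)

-- ===== LEMMAS AND PROOFS =====

-- every anchored pair is a keyword whose character at the offset is 'b'
theorem anchored_sound : ∀ ko ∈ dobAnchored, ko.1 ∈ dobKeywords ∧ ko.1.toList[ko.2]? = some 'b' := by
  decide

-- every keyword has an anchored pair, with the offset inside the keyword hitting 'b'
theorem keyword_anchor : ∀ k ∈ dobKeywords, ∃ o : Nat,
    (k, o) ∈ dobAnchored ∧ o < k.toList.length ∧ k.toList[o]? = some 'b' := by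
  intro k hk
  fin_cases hk
  exacts [⟨2, by decide⟩, ⟨8, by decide⟩, ⟨0, by decide⟩, ⟨0, by decide⟩,
          ⟨0, by decide⟩, ⟨0, by decide⟩, ⟨0, by decide⟩, ⟨8, by decide⟩]

-- B's anchor scan finds a match iff some keyword is an infix of the window
theorem anchorScan_iff (w : List Char) :
    ((PySem.List.enumerate w).any (fun jc =>
      jc.2 == 'b' && dobAnchored.any (fun ko =>
        (ko.2 : Int) ≤ jc.1 && PySem.Chars.startswith (w.drop (jc.1 - (ko.2 : Int)).toNat) ko.1.toList)))
      = true ↔ ∃ k ∈ dobKeywords, k.toList <:+: w := by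
  rw [List.any_eq_true]
  constructor
  · rintro ⟨jc, hmem, h⟩
    rw [Bool.and_eq_true, List.any_eq_true] at h
    obtain ⟨-, ko, hko, h2⟩ := h
    rw [Bool.and_eq_true] at h2
    obtain ⟨-, hsw⟩ := h2
    refine ⟨ko.1, (anchored_sound ko hko).1, ?_⟩
    exact ((PySem.Chars.startswith_iff _ _).mp hsw).isInfix.trans (List.drop_suffix _ _).isInfix
  · rintro ⟨k, hk, hinf⟩
    obtain ⟨o, hko, holt, hob⟩ := keyword_anchor k hk
    obtain ⟨s, t, hw⟩ := hinf
    have hlen : s.length + o < w.length := by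
      subst hw; simp only [List.length_append]; omega
    refine ⟨((s.length + o : Nat), w[s.length + o]), ?_, ?_⟩
    · rw [PySem.List.mem_enumerate_iff]
      exact ⟨s.length + o, hlen, by simp⟩
    · rw [Bool.and_eq_true, List.any_eq_true]
      have hdrop : w.drop s.length = k.toList ++ t := by
        subst hw
        rw [List.append_assoc, List.drop_append_of_le_length (by simp)]
        simp
      have hchar : w[s.length + o] = 'b' := by
        have h1 : (w.drop s.length)[o]? = some 'b' := by
          rw [hdrop, List.getElem?_append_left (by omega)]; exact hob
        rw [List.getElem?_drop] at h1
        rw [List.getElem?_eq_getElem hlen] at h1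
        exact Option.some.inj h1
      constructor
      · simpa using hchar
      · refine ⟨(k, o), hko, ?_⟩
        rw [Bool.and_eq_true]
        constructor
        · simp
        · have : ((((s.length + o : Nat) : Int)) - (o : Int)).toNat = s.length := by omega
          rw [this, PySem.Chars.startswith_iff, hdrop]
          exact ⟨t, rfl⟩

-- ===== VERDICT =====
theorem is_dob_context_spec : Claim_equal_is_dob_context := by
  intro text start end_ _
  unfold Spec_is_dob_context is_dob_context is_dob_context_alt
  rw [Bool.eq_iff_iff, List.any_eq_true, anchorScan_iff]
  constructor
  · rintro ⟨k, hk, h⟩; exact ⟨k, hk, (PySem.Str.isIn_iff_infix k _).mp h⟩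
  · rintro ⟨k, hk, h⟩; exact ⟨k, hk, (PySem.Str.isIn_iff_infix k _).mpr h⟩
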